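-- pv_equiv track=rewrite | github.com/renaudll/omtk | scripts/omtk/vendor/maya_mock/base/schema.py | iter_namespaces
-- ===== SOURCE A (Python) =====
-- def get_namespace_parent(namespace):
--     """
--     From a provided namespace, return it's parent or None if there's no parent.
--
--     >>> get_namespace_parent('org.foo.bar')
--     'org.foo'
--     >>> get_namespace_parent('org') is None
--     True
--
--     :param str namespace: The namespace to namespace.
--     :return: The parent namespace
--     :rtype: str
--     """
--     return namespace.rsplit(".", 1)[0] if "." in namespace else None
--
-- def iter_namespaces(namespaces):
--     """
--     From a list of namespace, yield all namespaces including their parent in hierarchy order.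
--
--     >>> tuple(iter_namespaces(['a.b', 'a.b.c', 'd.e']))
--     ('a', 'a.b', 'a.b.c', 'd', 'd.e')
--
--     :param namespaces: A list of namespaces.
--     :type namespaces: list(str)
--     :return: A namespace generator
--     :rtype: generator(str)
--     """
--     known = set()
--
--     def _subroutine(namespace):
--         # Don't yield the same node twice
--         if namespace in known:
--             return
--
--         # Recursively yield parent first
--         parent_namespace = get_namespace_parent(namespace)
--         if parent_namespace:
--             for yielded in _subroutine(parent_namespace):
--                 yield yielded
--
--         # Yield
--         known.add(namespace)
--         yield namespace
--
--     for namespace in namespaces: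
--         for yielded in _subroutine(namespace):
--             yield yielded
-- ===== SOURCE B (Python) =====
-- def iter_namespaces(namespaces):
--     """Iterative one-pass rewrite: scan each namespace's characters once and
--     emit the prefix ending before each dot, then the namespace itself."""
--     known = set()
--     for namespace in namespaces:
--         for i, char in enumerate(namespace):
--             if char == "." and i > 0:
--                 prefix = namespace[:i]
--                 if prefix not in known:
--                     known.add(prefix)
--                     yield prefix
--         if namespace not in known:
--             known.add(namespace)
--             yield namespace
-- ===== Notes on version B (the rewrite author's own statement) =====
-- stated objective: simpler
-- what changed: Replaced the recursive parent-chasing helper (repeated rsplit from leaf to root, yielding on the way back) with a single left-to-right character scan per namespace that emits the prefix before each dot and then the namespace itself, keeping the same first-seen dedup set.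
import Mathlib
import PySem

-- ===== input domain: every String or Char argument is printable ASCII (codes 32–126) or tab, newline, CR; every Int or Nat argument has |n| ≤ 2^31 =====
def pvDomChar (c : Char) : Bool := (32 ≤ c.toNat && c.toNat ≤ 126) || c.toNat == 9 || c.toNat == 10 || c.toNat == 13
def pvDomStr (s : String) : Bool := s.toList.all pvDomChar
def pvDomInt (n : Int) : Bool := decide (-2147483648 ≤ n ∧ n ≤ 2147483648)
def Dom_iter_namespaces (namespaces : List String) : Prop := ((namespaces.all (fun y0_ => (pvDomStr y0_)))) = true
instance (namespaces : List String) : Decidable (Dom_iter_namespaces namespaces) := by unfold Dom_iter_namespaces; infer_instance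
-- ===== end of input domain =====

-- B replaces A's recursive parent-chasing (repeated rsplit) by one left-to-right
-- character scan per namespace, emitting the prefix before each dot; objective: simpler.

-- ===== PORT A =====
-- hand port of `namespace.rsplit(".", 1)[0]`: the characters before the LAST '.';
-- exact whenever '.' occurs in the string (the only case A uses it)
def pvRsplitHead (cs : List Char) : List Char :=
  (((cs.reverse).dropWhile (fun c => c ≠ '.')).drop 1).reverse

def get_namespace_parent (namespace_ : List Char) : Option (List Char) :=
  if PySem.Chars.isIn ['.'] namespace_ then some (pvRsplitHead namespace_) else none

theorem pv_parent_lt {ns p : List Char} (hp : get_namespace_parent ns = some p) :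
    p.length < ns.length := by
  unfold get_namespace_parent at hp
  split at hp
  · rename_i h
    have hmem : ('.' : Char) ∈ ns := by
      have hinf := (PySem.Chars.isIn_iff_infix ['.'] ns).mp h
      exact hinf.subset (by simp)
    have hmemr : ('.' : Char) ∈ ns.reverse := by simpa using hmem
    have hne : (ns.reverse.dropWhile (fun c => c ≠ '.')) ≠ [] := by
      intro hnil
      have := List.dropWhile_eq_nil_iff.mp hnil
      exact (by simpa using this '.' hmemr)
    have hlen1 : 1 ≤ (ns.reverse.dropWhile (fun c => c ≠ '.')).length :=
      Nat.one_le_iff_ne_zero.mpr (by simpa [List.length_eq_zero_iff] using hne)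
    have hlen2 : (ns.reverse.dropWhile (fun c => c ≠ '.')).length ≤ ns.length := by
      simpa using List.length_dropWhile_le (fun c => decide (c ≠ '.')) ns.reverse
    cases hp
    simp only [pvRsplitHead, List.length_reverse, List.length_drop]
    omega
  · cases hp

-- the inner generator `_subroutine`: state = (known, yielded list)
def pvSubA (known : List (List Char)) (ns : List Char) : List (List Char) × List (List Char) :=
  if ns ∈ known then (known, [])
  else
    match h : get_namespace_parent ns with
    | some p =>
        if p ≠ [] then
          let r := pvSubA known p
          (PySem.Set.add r.1 ns, r.2 ++ [ns])
        else (PySem.Set.add known ns, [ns])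
    | none => (PySem.Set.add known ns, [ns])
termination_by ns.length
decreasing_by exact pv_parent_lt h

def iter_namespaces (namespaces : List String) : List String :=
  ((namespaces.foldl
      (fun (acc : List (List Char) × List (List Char)) ns =>
        let r := pvSubA acc.1 ns.toList
        (r.1, acc.2 ++ r.2))
      (PySem.Set.empty, [])).2).map String.ofList

-- ===== PORT B =====
-- per-namespace body of B: scan (i, char) pairs; `namespace[:i]` is `take i`
-- (exact: enumerate indices are ≥ 0), then consider the namespace itself
def pvSubB (known : List (List Char)) (ns : List Char) : List (List Char) × List (List Char) :=
  let r := (PySem.List.enumerate ns 0).foldl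
    (fun (acc : List (List Char) × List (List Char)) ic =>
      if ic.2 = '.' ∧ 0 < ic.1 then
        let pre := ns.take ic.1.toNat
        if pre ∉ acc.1 then (PySem.Set.add acc.1 pre, acc.2 ++ [pre]) else acc
      else acc)
    (known, [])
  if ns ∉ r.1 then (PySem.Set.add r.1 ns, r.2 ++ [ns]) else r

def iter_namespaces_alt (namespaces : List String) : List String :=
  ((namespaces.foldl
      (fun (acc : List (List Char) × List (List Char)) ns =>
        let r := pvSubB acc.1 ns.toList
        (r.1, acc.2 ++ r.2))
      (PySem.Set.empty, [])).2).map String.ofList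

-- ===== PRECONDITION & SPEC =====
def Spec_iter_namespaces (namespaces : List String) (out : List String) : Prop := out = iter_namespaces_alt namespaces
instance (namespaces : List String) (out : List String) : Decidable (Spec_iter_namespaces namespaces out) := by unfold Spec_iter_namespaces; infer_instance

-- ===== CLAIM (what is proved, stated in full; the proofs are below) =====
def Claim_equal_iter_namespaces : Prop := ∀ (namespaces : List String), Dom_iter_namespaces namespaces → Spec_iter_namespaces namespaces (iter_namespaces namespaces)

-- ===== LEMMAS AND PROOFS =====

-- the list of proper ancestors of ns: the prefix before each dot (nonempty ones), root first
def pvDotTakes (ns : List Char) : List (List Char) :=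
  (List.range ns.length).filterMap
    (fun i => if ns.getD i ' ' = '.' ∧ 0 < i then some (ns.take i) else none)

def pvChain (ns : List Char) : List (List Char) := pvDotTakes ns ++ [ns]

-- `known` is closed under taking (nonempty) ancestors
def pvClosed (k : List (List Char)) : Prop := ∀ x ∈ k, ∀ p ∈ pvDotTakes x, p ∈ k

theorem pvDotTakes_mem {x ns : List Char} :
    x ∈ pvDotTakes ns ↔ ∃ j, j < ns.length ∧ ns.getD j ' ' = '.' ∧ 0 < j ∧ x = ns.take j := by
  simp only [pvDotTakes, List.mem_filterMap, List.mem_range, Option.ite_none_right_eq_some,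
    Option.some.injEq]
  constructor
  · rintro ⟨j, hj, ⟨hd, hp⟩, hx⟩; exact ⟨j, hj, hd, hp, hx.symm⟩
  · rintro ⟨j, hj, hd, hp, hx⟩; exact ⟨j, hj, ⟨hd, hp⟩, hx.symm⟩

theorem pvDotTakes_length_lt {x ns : List Char} (h : x ∈ pvDotTakes ns) :
    x.length < ns.length := by
  obtain ⟨j, hj, _, _, hx⟩ := pvDotTakes_mem.mp h
  subst hx; simp; omega

theorem pv_getD_dot_lt {ns : List Char} {i : Nat} (hd : ns.getD i ' ' = '.') :
    i < ns.length := by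
  by_contra hge
  rw [List.getD_eq_default _ _ (by omega)] at hd
  exact absurd hd (by decide)

theorem pvDotTakes_nodup (ns : List Char) : (pvDotTakes ns).Nodup := by
  apply List.Pairwise.filterMap _ _ List.pairwise_lt_range
  intro i j hij x hx x' hx'
  rw [Option.ite_none_right_eq_some, Option.some.injEq] at hx hx'
  obtain ⟨⟨hd, -⟩, rfl⟩ := hx
  obtain ⟨⟨hd', -⟩, rfl⟩ := hx'
  have hi := pv_getD_dot_lt hd
  have hj := pv_getD_dot_lt hd'
  intro he
  have := congrArg List.length he
  simp [List.length_take] at this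
  omega

theorem pvDotTakes_nil_of_not_mem {ns : List Char} (h : ('.' : Char) ∉ ns) :
    pvDotTakes ns = [] := by
  unfold pvDotTakes
  rw [List.filterMap_eq_nil_iff]
  intro i hi
  rw [List.mem_range] at hi
  rw [if_neg]
  rintro ⟨hd, -⟩
  rw [List.getD_eq_getElem _ _ hi] at hd
  exact h (hd ▸ List.getElem_mem hi)

theorem pvDotTakes_split {a b : List Char} (hb : ('.' : Char) ∉ b) :
    pvDotTakes (a ++ '.' :: b) = pvDotTakes a ++ (if a = [] then [] else [a]) := by
  unfold pvDotTakes
  have hlen : (a ++ '.' :: b).length = a.length + (b.length + 1) := by simp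
  rw [hlen, List.range_add, List.filterMap_append, List.filterMap_map]
  congr 1
  · apply List.filterMap_congr
    intro i hi
    rw [List.mem_range] at hi
    rw [List.getD_append _ _ _ _ hi, List.take_append_of_le_length (le_of_lt hi)]
  · have hcg : ∀ k ∈ List.range (b.length + 1),
        ((fun i => if (a ++ '.' :: b).getD i ' ' = '.' ∧ 0 < i
            then some ((a ++ '.' :: b).take i) else none) ∘ (a.length + ·)) k
          = (fun k => if k = 0 ∧ a ≠ [] then some a else none) k := by
      intro k hk
      rw [List.mem_range] at hk
      simp only [Function.comp]
      rcases Nat.eq_zero_or_pos k with rfl | hkpos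
      · have hd : (a ++ '.' :: b).getD (a.length + 0) ' ' = '.' := by
          rw [List.getD_append_right _ _ _ _ (by omega)]
          simp
        have ht : (a ++ '.' :: b).take (a.length + 0) = a := by
          simpa using List.take_left (l₁ := a) (l₂ := '.' :: b)
        rcases eq_or_ne a ([] : List Char) with rfl | ha
        · simp
        · have hpos : 0 < a.length + 0 := by
            have := List.length_pos_iff.mpr ha; omega
          rw [if_pos ⟨hd, hpos⟩, if_pos ⟨rfl, ha⟩, ht]
      · have hd : (a ++ '.' :: b).getD (a.length + k) ' ' = b.getD (k - 1) ' ' := by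
          rw [List.getD_append_right _ _ _ _ (by omega)]
          have : a.length + k - a.length = k := by omega
          rw [this]
          cases k with
          | zero => omega
          | succ m => simp
        have hnb : (a ++ '.' :: b).getD (a.length + k) ' ' ≠ '.' := by
          rw [hd]
          rcases Nat.lt_or_ge (k - 1) b.length with hlt | hge
          · rw [List.getD_eq_getElem _ _ hlt]
            intro he; exact hb (he ▸ List.getElem_mem hlt)
          · rw [List.getD_eq_default _ _ hge]; decide
        rw [if_neg (by rintro ⟨hc, -⟩; exact hnb hc), if_neg (by rintro ⟨hc, -⟩; omega)]
    rw [List.filterMap_congr hcg, List.range_succ_eq_map, List.filterMap_cons]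
    have hrest : (List.range b.length).filterMap
        ((fun k => if k = 0 ∧ a ≠ [] then some a else none) ∘ Nat.succ) = [] := by
      rw [← List.filterMap_map, List.filterMap_eq_nil_iff]
      intro x hx
      simp at hx
      obtain ⟨m, -, rfl⟩ := hx
      simp
    rcases eq_or_ne a ([] : List Char) with rfl | ha
    · simp [hrest]
    · simp [ha, hrest]

theorem pvDotTakes_take {x ns : List Char} {i : Nat} (h : x ∈ pvDotTakes (ns.take i)) :
    x ∈ pvDotTakes ns := by
  obtain ⟨j, hj, hd, hp, rfl⟩ := pvDotTakes_mem.mp h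
  rw [List.length_take] at hj
  have hj2 : j < ns.length := lt_of_lt_of_le hj (min_le_right _ _)
  have hji : j < i := lt_of_lt_of_le hj (min_le_left _ _)
  refine pvDotTakes_mem.mpr ⟨j, hj2, ?_, hp, ?_⟩
  · have hgd : (ns.take i).getD j ' ' = ns.getD j ' ' := by
      rw [List.getD_eq_getElem _ _ (by rw [List.length_take]; exact hj),
        List.getD_eq_getElem _ _ hj2]
      simp [List.getElem_take]
    rw [← hgd]; exact hd
  · rw [List.take_take, Nat.min_eq_left (le_of_lt hji)]

theorem pv_decomp {ns : List Char} (h : ('.' : Char) ∈ ns) :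
    ns = pvRsplitHead ns ++ '.' :: ((ns.reverse.takeWhile (fun c => c ≠ '.')).reverse) ∧
      ('.' : Char) ∉ ((ns.reverse.takeWhile (fun c => c ≠ '.')).reverse) := by
  have hmemr : ('.' : Char) ∈ ns.reverse := by simpa using h
  have hne : (ns.reverse.dropWhile (fun c => c ≠ '.')) ≠ [] := by
    intro hnil
    have := List.dropWhile_eq_nil_iff.mp hnil
    exact (by simpa using this '.' hmemr)
  have hhead : (ns.reverse.dropWhile (fun c => c ≠ '.')).head hne = '.' := by
    have := List.head_dropWhile_not (p := fun c => decide (c ≠ '.')) hne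
    simpa using this
  constructor
  · have hd : ns.reverse.dropWhile (fun c => c ≠ '.')
        = '.' :: (ns.reverse.dropWhile (fun c => c ≠ '.')).tail := by
      have hd0 := (List.cons_head_tail hne).symm
      rw [hhead] at hd0; exact hd0
    have hsplit : ns.reverse.takeWhile (fun c => c ≠ '.')
        ++ ns.reverse.dropWhile (fun c => c ≠ '.') = ns.reverse :=
      List.takeWhile_append_dropWhile
    unfold pvRsplitHead
    conv_lhs => rw [← ns.reverse_reverse, ← hsplit]
    rw [List.drop_one]
    conv_lhs => rw [hd]
    simp
  · intro hmem
    rw [List.mem_reverse] at hmem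
    have := List.mem_takeWhile_imp hmem
    simp at this

theorem pv_foldl_filterMap_ite {α β γ : Type} (l : List α) (p : α → Prop)
    [DecidablePred p] (h : α → β) (g : γ → β → γ) (init : γ) :
    l.foldl (fun acc x => if p x then g acc (h x) else acc) init
      = (l.filterMap (fun x => if p x then some (h x) else none)).foldl g init := by
  induction l generalizing init with
  | nil => rfl
  | cons x l ih => by_cases hp : p x <;> simp [hp, ih]

theorem pv_filterMap_enumerate (ns : List Char) :
    (PySem.List.enumerate ns 0).filterMap
      (fun ic => if ic.2 = '.' ∧ 0 < ic.1 then some (ns.take ic.1.toNat) else none)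
      = pvDotTakes ns := by
  rw [PySem.List.enumerate_eq_map_pyRange (d := ' '), List.filterMap_map,
    PySem.List.pyRange_one, List.filterMap_map]
  have hn : (((PySem.List.len ns : Int)) - 0).toNat = ns.length := by
    simp [PySem.List.len_eq]
  rw [hn]
  unfold pvDotTakes
  apply List.filterMap_congr
  intro j hj
  simp only [Function.comp, zero_add]
  simp [PySem.List.pyGetD_natCast, Int.toNat_natCast, Int.natCast_pos]

theorem pv_dedup_fold (l : List (List Char)) (hnd : l.Nodup) (k o : List (List Char)) :
    l.foldl (fun acc x => if x ∉ acc.1 then (PySem.Set.add acc.1 x, acc.2 ++ [x]) else acc) (k, o)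
      = (k ++ l.filter (fun x => x ∉ k), o ++ l.filter (fun x => x ∉ k)) := by
  induction l generalizing k o with
  | nil => simp
  | cons x l ih =>
      rw [List.foldl_cons]
      rcases List.nodup_cons.mp hnd with ⟨hx, hnd'⟩
      by_cases hxk : x ∈ k
      · rw [if_neg (by simpa using hxk)]
        rw [ih hnd' k o]
        simp [List.filter_cons, hxk]
      · rw [if_pos (by simpa using hxk), PySem.Set.add_of_not_mem hxk]
        rw [ih hnd' (k ++ [x]) (o ++ [x])]
        have hf : l.filter (fun y => y ∉ k ++ [x]) = l.filter (fun y => y ∉ k) := by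
          apply List.filter_congr
          intro y hy
          have hyx : y ≠ x := fun e => hx (e ▸ hy)
          simp [hyx]
        rw [hf]
        simp [List.filter_cons, hxk]

theorem pvSubA_spec_aux : ∀ (n : Nat) (ns : List Char), ns.length ≤ n →
    ∀ (k : List (List Char)), pvClosed k →
    pvSubA k ns = (k ++ (pvChain ns).filter (fun x => x ∉ k),
                   (pvChain ns).filter (fun x => x ∉ k)) := by
  intro n
  induction n using Nat.strong_induction_on with
  | _ n ih =>
    intro ns hlen k hc
    rw [pvSubA]
    by_cases hknown : ns ∈ k
    · rw [if_pos hknown]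
      have hfil : (pvChain ns).filter (fun x => x ∉ k) = [] := by
        rw [List.filter_eq_nil_iff]
        intro x hxchain
        have hxk : x ∈ k := by
          rcases List.mem_append.mp hxchain with h1 | h1
          · exact hc ns hknown x h1
          · simp at h1; subst h1; exact hknown
        simp [hxk]
      rw [hfil]; simp
    · rw [if_neg hknown]
      split
      · rename_i p hpar
        have hin : PySem.Chars.isIn ['.'] ns = true := by
          by_contra hni
          unfold get_namespace_parent at hpar
          rw [if_neg (by simpa using hni)] at hpar
          cases hpar
        have hps : p = pvRsplitHead ns := by
          unfold get_namespace_parent at hpar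
          rw [if_pos hin] at hpar
          exact (Option.some.injEq _ _).mp hpar |>.symm
        have hdotmem : ('.' : Char) ∈ ns :=
          ((PySem.Chars.isIn_iff_infix _ _).mp hin).subset (by simp)
        obtain ⟨hdec, hnb⟩ := pv_decomp hdotmem
        rw [← hps] at hdec
        have hsplit := pvDotTakes_split (a := p)
          (b := (ns.reverse.takeWhile (fun c => c ≠ '.')).reverse) hnb
        rw [← hdec] at hsplit
        by_cases hp : p = []
        · rw [if_neg (by simpa using hp)]
          rw [PySem.Set.add_of_not_mem hknown]
          unfold pvChain
          rw [hsplit, if_pos hp, hp]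
          have hdtnil : pvDotTakes ([] : List Char) = [] := rfl
          rw [hdtnil]
          simp [hknown]
        · rw [if_pos hp]
          have hplen : p.length < ns.length := by rw [hdec]; simp
          have ihp := ih p.length (by omega) p le_rfl k hc
          simp only []
          rw [ihp]
          have hnsF : ns ∉ (pvChain p).filter (fun x => x ∉ k) := by
            intro hm
            have hcm : ns ∈ pvChain p := List.mem_of_mem_filter hm
            have hle : ns.length ≤ p.length := by
              rcases List.mem_append.mp hcm with h1 | h1
              · exact le_of_lt (pvDotTakes_length_lt h1)
              · simp at h1; subst h1; exact le_rfl
            omega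
          rw [PySem.Set.add_of_not_mem (by
            intro hm
            rcases List.mem_append.mp hm with h1 | h1
            · exact hknown h1
            · exact hnsF h1)]
          unfold pvChain
          rw [hsplit, if_neg hp]
          simp [List.filter_append, List.filter_cons, hknown, List.append_assoc]
          by_cases hpk : p ∈ k <;> simp [hpk]
      · rename_i hpar
        have hdot : ('.' : Char) ∉ ns := by
          intro hm
          obtain ⟨s, t, hst⟩ := List.append_of_mem hm
          have hin : PySem.Chars.isIn ['.'] ns = true :=
            (PySem.Chars.isIn_iff_infix _ _).mpr ⟨s, t, by rw [hst]; simp⟩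
          unfold get_namespace_parent at hpar
          rw [if_pos hin] at hpar
          cases hpar
        have hdt : pvDotTakes ns = [] := pvDotTakes_nil_of_not_mem hdot
        rw [PySem.Set.add_of_not_mem hknown]
        unfold pvChain
        rw [hdt]
        simp [hknown]

theorem pvSubA_spec (ns : List Char) (k : List (List Char)) (hc : pvClosed k) :
    pvSubA k ns = (k ++ (pvChain ns).filter (fun x => x ∉ k),
                   (pvChain ns).filter (fun x => x ∉ k)) :=
  pvSubA_spec_aux ns.length ns le_rfl k hc

theorem pvSubB_spec (ns : List Char) (k : List (List Char)) :
    pvSubB k ns = (k ++ (pvChain ns).filter (fun x => x ∉ k),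
                   (pvChain ns).filter (fun x => x ∉ k)) := by
  unfold pvSubB
  rw [pv_foldl_filterMap_ite _ (fun ic : Int × Char => ic.2 = '.' ∧ 0 < ic.1)
    (fun ic => ns.take ic.1.toNat)
    (fun acc pre => if pre ∉ acc.1 then (PySem.Set.add acc.1 pre, acc.2 ++ [pre]) else acc)
    ((k, []))]
  rw [pv_filterMap_enumerate, pv_dedup_fold _ (pvDotTakes_nodup ns) k []]
  have hnsd : ns ∉ (pvDotTakes ns).filter (fun x => x ∉ k) := fun hm =>
    absurd (pvDotTakes_length_lt (List.mem_of_mem_filter hm)) (lt_irrefl _)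
  by_cases hns : ns ∈ k
  · rw [if_neg (by simp [hns])]
    unfold pvChain
    simp [List.filter_append, List.filter_cons, hns]
  · rw [if_pos (by simp [hns]; exact fun hm => absurd (pvDotTakes_length_lt hm) (lt_irrefl _)), PySem.Set.add_of_not_mem (by
      intro hm
      rcases List.mem_append.mp hm with h1 | h1
      · exact hns h1
      · exact hnsd h1)]
    unfold pvChain
    simp [List.filter_append, hns, List.append_assoc]

theorem pvClosed_step (ns : List Char) (k : List (List Char)) (hc : pvClosed k) :
    pvClosed (k ++ (pvChain ns).filter (fun x => x ∉ k)) := by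
  intro x hx p hp
  rw [List.mem_append] at hx ⊢
  rcases hx with hx | hx
  · exact Or.inl (hc x hx p hp)
  · have hxchain : x ∈ pvChain ns := List.mem_of_mem_filter hx
    have hpns : p ∈ pvDotTakes ns := by
      rcases List.mem_append.mp hxchain with h1 | h1
      · obtain ⟨j, hj, hd, hpos, rfl⟩ := pvDotTakes_mem.mp h1
        exact pvDotTakes_take hp
      · simp at h1; subst h1; exact hp
    by_cases hpk : p ∈ k
    · exact Or.inl hpk
    · refine Or.inr (List.mem_filter.mpr ⟨?_, by simpa using hpk⟩)
      exact List.mem_append_left _ hpns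

theorem pv_top (namespaces : List String) (k o : List (List Char)) (hc : pvClosed k) :
    namespaces.foldl
      (fun (acc : List (List Char) × List (List Char)) ns =>
        let r := pvSubA acc.1 ns.toList
        (r.1, acc.2 ++ r.2)) (k, o)
    = namespaces.foldl
      (fun (acc : List (List Char) × List (List Char)) ns =>
        let r := pvSubB acc.1 ns.toList
        (r.1, acc.2 ++ r.2)) (k, o) := by
  induction namespaces generalizing k o with
  | nil => rfl
  | cons ns rest ih =>
      simp only [List.foldl_cons]
      rw [pvSubA_spec _ _ hc, pvSubB_spec]
      exact ih _ _ (pvClosed_step ns.toList k hc)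

-- ===== VERDICT (by name: the statement is the Claim_ definition above) =====
theorem iter_namespaces_spec : Claim_equal_iter_namespaces := by
  intro namespaces _
  unfold Spec_iter_namespaces iter_namespaces iter_namespaces_alt
  rw [pv_top namespaces PySem.Set.empty []
    (by intro x hx p hp; simp [PySem.Set.empty] at hx)]
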